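-- pv_equiv track=rewrite | github.com/vladlpavlov/parameterizable | src/mixinforge/command_line_tools/basic_file_utils.py | categorize_cache_items
-- ===== SOURCE A (Python) =====
-- def categorize_cache_items(removed_items: list[str]) -> dict[str, dict[str, int]]:
--     """Categorize removed cache items by type and location.
--
--     Analyzes a list of removed cache file paths and categorizes them by:
--     - Cache type (e.g., __pycache__, .pyc files, .pytest_cache)
--     - Top-level directory location
--
--     Args:
--         removed_items: List of relative paths to removed cache items.
--
--     Returns:
--         Dictionary with two keys:
--         - 'by_type': Dict mapping cache type names to counts
--         - 'by_location': Dict mapping top-level directory names to counts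
--
--     Example:
--         >>> items = ['tests/__pycache__/foo.pyc', 'src/__pycache__/bar.pyc', 'tests/.pytest_cache']
--         >>> result = categorize_cache_items(items)
--         >>> result['by_type']
--         {'__pycache__': 2, '.pytest_cache': 1}
--         >>> result['by_location']
--         {'tests': 2, 'src': 1}
--     """
--     categories = {
--         '__pycache__': 0,
--         '.pyc/.pyo files': 0,
--         '.pytest_cache': 0,
--         '.ruff_cache': 0,
--         '.mypy_cache': 0,
--         '.hypothesis': 0,
--         '.tox': 0,
--         '.eggs': 0,
--         '.coverage': 0
--     }
--
--     top_level_dirs = {}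
--
--     for item in removed_items:
--         # Categorize by cache type
--         if '__pycache__' in item:
--             categories['__pycache__'] += 1
--         elif item.endswith('.pyc') or item.endswith('.pyo'):
--             categories['.pyc/.pyo files'] += 1
--         elif '.pytest_cache' in item:
--             categories['.pytest_cache'] += 1
--         elif '.ruff_cache' in item:
--             categories['.ruff_cache'] += 1
--         elif '.mypy_cache' in item:
--             categories['.mypy_cache'] += 1
--         elif '.hypothesis' in item:
--             categories['.hypothesis'] += 1
--         elif '.tox' in item:
--             categories['.tox'] += 1
--         elif '.eggs' in item:
--             categories['.eggs'] += 1
--         elif '.coverage' in item: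
--             categories['.coverage'] += 1
--
--         # Track by top-level directory (handle both / and \ separators)
--         top_dir = item.split('/')[0] if '/' in item else item.split('\\')[0]
--         top_level_dirs[top_dir] = top_level_dirs.get(top_dir, 0) + 1
--
--     return {
--         'by_type': {k: v for k, v in categories.items() if v > 0},
--         'by_location': top_level_dirs
--     }
-- ===== SOURCE B (Python) =====
-- _RULES = [
--     ('__pycache__',     lambda s: '__pycache__' in s),
--     ('.pyc/.pyo files', lambda s: s.endswith(('.pyc', '.pyo'))),
--     ('.pytest_cache',   lambda s: '.pytest_cache' in s),
--     ('.ruff_cache',     lambda s: '.ruff_cache' in s),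
--     ('.mypy_cache',     lambda s: '.mypy_cache' in s),
--     ('.hypothesis',     lambda s: '.hypothesis' in s),
--     ('.tox',            lambda s: '.tox' in s),
--     ('.eggs',           lambda s: '.eggs' in s),
--     ('.coverage',       lambda s: '.coverage' in s),
-- ]
--
--
-- def _classify(item):
--     return next((name for name, pred in _RULES if pred(item)), None)
--
--
-- def _top_dir(item):
--     return item.split('/')[0] if '/' in item else item.split('\\')[0]
--
--
-- def _tally(xs):
--     counts = {}
--     for x in xs:
--         counts[x] = counts.get(x, 0) + 1
--     return counts
--
--
-- def categorize_cache_items(removed_items: list[str]) -> dict[str, dict[str, int]]: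
--     labels = [_classify(item) for item in removed_items]
--     by_type = {name: n for name, _ in _RULES if (n := labels.count(name)) > 0}
--     by_location = _tally(_top_dir(item) for item in removed_items)
--     return {'by_type': by_type, 'by_location': by_location}
-- ===== Notes on version B (the rewrite author's own statement) =====
-- stated objective: alternative
-- what changed: A tallies counts imperatively into pre-seeded dicts through a nine-branch elif chain inside one loop; B is declarative: a rule table drives a first-match classifier, by_type is a comprehension counting labels per rule, and by_location is a map over top dirs followed by a separate tally helper.
import Mathlib
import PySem

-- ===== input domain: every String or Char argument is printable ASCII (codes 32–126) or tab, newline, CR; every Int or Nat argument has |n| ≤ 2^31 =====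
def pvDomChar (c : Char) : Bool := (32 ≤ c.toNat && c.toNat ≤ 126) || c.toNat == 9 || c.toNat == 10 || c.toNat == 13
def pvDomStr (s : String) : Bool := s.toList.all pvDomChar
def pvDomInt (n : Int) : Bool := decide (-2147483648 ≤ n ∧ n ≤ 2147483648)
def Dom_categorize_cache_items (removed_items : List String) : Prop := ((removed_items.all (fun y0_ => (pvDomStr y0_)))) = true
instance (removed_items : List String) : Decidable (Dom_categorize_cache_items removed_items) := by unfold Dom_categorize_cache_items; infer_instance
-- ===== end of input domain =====

-- B replaces A's single imperative loop (nine-branch elif chain tallying into pre-seeded dicts)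
-- by a declarative rule table: a first-match classifier, a per-rule count comprehension for
-- by_type, and map-then-tally for by_location. Objective: alternative (same asymptotic cost).

-- ===== PORT A =====
-- helper shared by both ports: the identical expression
-- "item.split('/')[0] if '/' in item else item.split('\\')[0]" appears in Source A and Source B
def pvTopDir (item : String) : String :=
  if PySem.Str.isIn "/" item then ((PySem.Str.split? item "/").getD []).headD ""
  else ((PySem.Str.split? item "\\").getD []).headD ""

def pvCacheInit : PySem.Dict String Int :=
  PySem.Dict.ofList [("__pycache__", 0), (".pyc/.pyo files", 0), (".pytest_cache", 0),
    (".ruff_cache", 0), (".mypy_cache", 0), (".hypothesis", 0), (".tox", 0),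
    (".eggs", 0), (".coverage", 0)]

-- the elif chain of A ("categories[k] += 1" with the key always present)
def pvStepCats (cats : PySem.Dict String Int) (item : String) : PySem.Dict String Int :=
  if PySem.Str.isIn "__pycache__" item then
    cats.insert "__pycache__" (cats.getD "__pycache__" 0 + 1)
  else if PySem.Str.endswith item ".pyc" || PySem.Str.endswith item ".pyo" then
    cats.insert ".pyc/.pyo files" (cats.getD ".pyc/.pyo files" 0 + 1)
  else if PySem.Str.isIn ".pytest_cache" item then
    cats.insert ".pytest_cache" (cats.getD ".pytest_cache" 0 + 1)
  else if PySem.Str.isIn ".ruff_cache" item then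
    cats.insert ".ruff_cache" (cats.getD ".ruff_cache" 0 + 1)
  else if PySem.Str.isIn ".mypy_cache" item then
    cats.insert ".mypy_cache" (cats.getD ".mypy_cache" 0 + 1)
  else if PySem.Str.isIn ".hypothesis" item then
    cats.insert ".hypothesis" (cats.getD ".hypothesis" 0 + 1)
  else if PySem.Str.isIn ".tox" item then
    cats.insert ".tox" (cats.getD ".tox" 0 + 1)
  else if PySem.Str.isIn ".eggs" item then
    cats.insert ".eggs" (cats.getD ".eggs" 0 + 1)
  else if PySem.Str.isIn ".coverage" item then
    cats.insert ".coverage" (cats.getD ".coverage" 0 + 1)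
  else cats

def categorize_cache_items (removed_items : List String) : List (String × List (String × Int)) :=
  let st := removed_items.foldl
    (fun (st : PySem.Dict String Int × PySem.Dict String Int) item =>
      (pvStepCats st.1 item,
       st.2.insert (pvTopDir item) (st.2.getD (pvTopDir item) 0 + 1)))
    (pvCacheInit, PySem.Dict.empty)
  [("by_type", st.1.items.filter (fun p => decide (0 < p.2))),
   ("by_location", st.2.items)]

-- ===== PORT B =====
def pvRules : List (String × (String → Bool)) :=
  [("__pycache__", fun s => PySem.Str.isIn "__pycache__" s),
   (".pyc/.pyo files", fun s => PySem.Str.endswith s ".pyc" || PySem.Str.endswith s ".pyo"),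
   (".pytest_cache", fun s => PySem.Str.isIn ".pytest_cache" s),
   (".ruff_cache", fun s => PySem.Str.isIn ".ruff_cache" s),
   (".mypy_cache", fun s => PySem.Str.isIn ".mypy_cache" s),
   (".hypothesis", fun s => PySem.Str.isIn ".hypothesis" s),
   (".tox", fun s => PySem.Str.isIn ".tox" s),
   (".eggs", fun s => PySem.Str.isIn ".eggs" s),
   (".coverage", fun s => PySem.Str.isIn ".coverage" s)]

-- next((name for name, pred in _RULES if pred(item)), None)
def pvClassify (item : String) : Option String :=
  (pvRules.find? (fun r => r.2 item)).map (fun r => r.1)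

-- the "counts[x] = counts.get(x, 0) + 1" tally helper of Source B
def pvTally (xs : List String) : PySem.Dict String Int :=
  xs.foldl (fun counts x => counts.insert x (counts.getD x 0 + 1)) PySem.Dict.empty

def categorize_cache_items_alt (removed_items : List String) : List (String × List (String × Int)) :=
  let labels := removed_items.map pvClassify
  let by_type := pvRules.filterMap (fun r =>
    let n : Int := (labels.count (some r.1) : Int)
    if 0 < n then some (r.1, n) else none)
  let by_location := (pvTally (removed_items.map pvTopDir)).items
  [("by_type", by_type), ("by_location", by_location)]

-- ===== PRECONDITION & SPEC =====
def Spec_categorize_cache_items (removed_items : List String) (out : List (String × List (String × Int))) : Prop := out = categorize_cache_items_alt removed_items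
instance (removed_items : List String) (out : List (String × List (String × Int))) : Decidable (Spec_categorize_cache_items removed_items out) := by unfold Spec_categorize_cache_items; infer_instance

-- ===== CLAIM (what is proved, stated in full; the proofs are below) =====
def Claim_equal_categorize_cache_items : Prop := ∀ (removed_items : List String), Dom_categorize_cache_items removed_items → Spec_categorize_cache_items removed_items (categorize_cache_items removed_items)

-- ===== LEMMAS AND PROOFS =====

-- A's elif chain performs exactly one "+= 1" at the key B's classifier returns (or nothing)
theorem pvStepCats_eq_classify (cats : PySem.Dict String Int) (item : String) :
    pvStepCats cats item =
      match pvClassify item with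
      | none => cats
      | some k => cats.insert k (cats.getD k 0 + 1) := by
  unfold pvStepCats pvClassify pvRules
  simp only [List.find?]
  cases PySem.Str.isIn "__pycache__" item
  case true => rfl
  case false =>
  cases PySem.Str.endswith item ".pyc" || PySem.Str.endswith item ".pyo"
  case true => rfl
  case false =>
  cases PySem.Str.isIn ".pytest_cache" item
  case true => rfl
  case false =>
  cases PySem.Str.isIn ".ruff_cache" item
  case true => rfl
  case false =>
  cases PySem.Str.isIn ".mypy_cache" item
  case true => rfl
  case false =>
  cases PySem.Str.isIn ".hypothesis" item
  case true => rfl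
  case false =>
  cases PySem.Str.isIn ".tox" item
  case true => rfl
  case false =>
  cases PySem.Str.isIn ".eggs" item
  case true => rfl
  case false =>
  cases PySem.Str.isIn ".coverage" item
  case true => rfl
  case false => rfl

-- A's product-state loop splits into two independent folds
theorem pvFoldPair (l : List String) (a b : PySem.Dict String Int) :
    l.foldl (fun st item =>
        (pvStepCats st.1 item, st.2.insert (pvTopDir item) (st.2.getD (pvTopDir item) 0 + 1)))
      (a, b) =
    (l.foldl pvStepCats a,
     l.foldl (fun d item => d.insert (pvTopDir item) (d.getD (pvTopDir item) 0 + 1)) b) := by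
  induction l generalizing a b with
  | nil => rfl
  | cons x t ih => simp [List.foldl_cons, ih]

-- the cats fold is an insert-increment fold over the classified labels
theorem pvFoldCats (l : List String) (d : PySem.Dict String Int) :
    l.foldl pvStepCats d =
      (l.filterMap pvClassify).foldl (fun d k => d.insert k (d.getD k 0 + 1)) d := by
  induction l generalizing d with
  | nil => rfl
  | cons x t ih =>
    simp only [List.foldl_cons, List.filterMap_cons]
    rw [pvStepCats_eq_classify]
    cases pvClassify x <;> simp [ih]

-- every classified label is one of the nine pre-seeded keys
theorem pvClassify_mem_keys (item k : String) (h : pvClassify item = some k) :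
    k ∈ pvCacheInit.keys := by
  unfold pvClassify at h
  rcases Option.map_eq_some_iff.mp h with ⟨r, hr, hk⟩
  have hmem := List.mem_of_find?_eq_some hr
  subst hk
  fin_cases hmem <;> decide

-- an insert-increment fold over contained keys leaves the key list unchanged
theorem pvKeysFold (ks : List String) (d : PySem.Dict String Int)
    (h : ∀ k ∈ ks, k ∈ d.keys) :
    (ks.foldl (fun d k => d.insert k (d.getD k 0 + 1)) d).keys = d.keys := by
  induction ks generalizing d with
  | nil => rfl
  | cons x t ih =>
    simp only [List.foldl_cons]
    have hx : d.contains x := by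
      rw [PySem.Dict.contains_iff_mem_keys]
      exact h x (by simp)
    rw [ih]
    · exact PySem.Dict.keys_insert_of_contains d _ hx
    · intro k hk
      rw [PySem.Dict.mem_keys_insert]
      exact Or.inr (h k (by simp [hk]))

-- counting a label among classified items = counting the optional label among all labels
theorem pvCountFilterMap (l : List String) (k : String) :
    (l.filterMap pvClassify).count k = (l.map pvClassify).count (some k) := by
  induction l with
  | nil => rfl
  | cons x t ih =>
    simp only [List.filterMap_cons, List.map_cons]
    cases hx : pvClassify x with
    | none =>
      rw [List.count_cons]
      simp [ih]
    | some v =>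
      by_cases hv : v = k <;> simp [ih, hv]

-- the generic bridge: filtering the fixed-order count table = the filterMap comprehension
theorem pvFilterEqFilterMap (rules : List (String × (String → Bool))) (cnt : String → Int) :
    ((rules.map (fun r => ((r.1 : String), cnt r.1))).filter (fun p => decide (0 < p.2))) =
      rules.filterMap (fun r => if 0 < cnt r.1 then some (r.1, cnt r.1) else none) := by
  induction rules with
  | nil => rfl
  | cons r t ih =>
    simp only [List.map_cons, List.filter_cons, List.filterMap_cons]
    by_cases h : 0 < cnt r.1 <;> simp [h, ih]

-- ===== VERDICT (by name: the statement is the Claim_ definition above) =====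
theorem categorize_cache_items_spec : Claim_equal_categorize_cache_items := by
  intro removed_items _
  unfold Spec_categorize_cache_items categorize_cache_items categorize_cache_items_alt
  dsimp only
  rw [pvFoldPair]
  have htop :
      removed_items.foldl
        (fun (d : PySem.Dict String Int) item =>
          d.insert (pvTopDir item) (d.getD (pvTopDir item) 0 + 1)) PySem.Dict.empty =
      pvTally (removed_items.map pvTopDir) := by
    unfold pvTally
    rw [List.foldl_map]
  rw [htop]
  have hcats := pvFoldCats removed_items pvCacheInit
  have hkeysmem : ∀ k ∈ removed_items.filterMap pvClassify, k ∈ pvCacheInit.keys := by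
    intro k hk
    rcases List.mem_filterMap.mp hk with ⟨item, _, hcl⟩
    exact pvClassify_mem_keys item k hcl
  have hkeys := pvKeysFold (removed_items.filterMap pvClassify) pvCacheInit hkeysmem
  have hnodup : (removed_items.foldl pvStepCats pvCacheInit).keys.Nodup := by
    rw [hcats, hkeys]; decide
  have hitems := PySem.Dict.items_eq_map_keys (removed_items.foldl pvStepCats pvCacheInit) hnodup 0
  have hgetD : ∀ k, (removed_items.foldl pvStepCats pvCacheInit).getD k 0 =
      pvCacheInit.getD k 0 + ((removed_items.map pvClassify).count (some k) : Int) := by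
    intro k
    rw [hcats, PySem.Dict.getD_foldl_insert_add_one, pvCountFilterMap]
  have hkeys' : (removed_items.foldl pvStepCats pvCacheInit).keys = pvRules.map (fun r => r.1) := by
    rw [hcats, hkeys]; decide
  rw [hitems, hkeys']
  have hz : ∀ k ∈ pvRules.map (fun r => r.1), pvCacheInit.getD k 0 = 0 := by decide
  have hmap : (pvRules.map (fun r => r.1)).map
      (fun k => (k, (removed_items.foldl pvStepCats pvCacheInit).getD k 0)) =
      pvRules.map (fun r => (r.1, ((removed_items.map pvClassify).count (some r.1) : Int))) := by
    rw [List.map_map]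
    apply List.map_congr_left
    intro r hr
    simp only [Function.comp]
    rw [hgetD, hz r.1 (List.mem_map_of_mem hr)]
    simp
  rw [hmap]
  rw [pvFilterEqFilterMap pvRules (fun n => ((removed_items.map pvClassify).count (some n) : Int))]
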